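-- pv_equiv track=rewrite | github.com/anthonylangsworth/RoutePlotter | bubble_runner.py | remove_reverse_routes
-- ===== SOURCE A (Python) =====
-- from typing import List, Tuple, Dict, Iterable, Any
--
-- def get_system_names(route: List[Dict]) -> List[str]:
--     return [system["name"] for system in route]
--
-- def remove_reverse_routes(routes: List[List[Dict]]) -> List[List[Dict]]:
--     result = []
--     result_reversed_system_names = set()
--     for route in routes:
--         system_names = get_system_names(route)
--         if not "\t".join(system_names) in result_reversed_system_names:
--             result.append(route)
--             result_reversed_system_names.add("\t".join(system_names[::-1]))
--     return result
-- ===== SOURCE B (Python) =====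
-- def get_system_names(route):
--     return [system["name"] for system in route]
--
-- def remove_reverse_routes(routes):
--     result = []
--     pending = list(routes)
--     while pending:
--         head = pending[0]
--         result.append(head)
--         blocked = "\t".join(get_system_names(head)[::-1])
--         pending = [r for r in pending[1:] if "\t".join(get_system_names(r)) != blocked]
--     return result
-- ===== Notes on version B (the rewrite author's own statement) =====
-- stated objective: alternative
-- what changed: B replaces A's single pass with an auxiliary set of reversed keys by a sieve: repeatedly keep the first pending route and filter out of the remaining pending routes every route whose forward joined key equals the kept route's reversed joined key.
import Mathlib
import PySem

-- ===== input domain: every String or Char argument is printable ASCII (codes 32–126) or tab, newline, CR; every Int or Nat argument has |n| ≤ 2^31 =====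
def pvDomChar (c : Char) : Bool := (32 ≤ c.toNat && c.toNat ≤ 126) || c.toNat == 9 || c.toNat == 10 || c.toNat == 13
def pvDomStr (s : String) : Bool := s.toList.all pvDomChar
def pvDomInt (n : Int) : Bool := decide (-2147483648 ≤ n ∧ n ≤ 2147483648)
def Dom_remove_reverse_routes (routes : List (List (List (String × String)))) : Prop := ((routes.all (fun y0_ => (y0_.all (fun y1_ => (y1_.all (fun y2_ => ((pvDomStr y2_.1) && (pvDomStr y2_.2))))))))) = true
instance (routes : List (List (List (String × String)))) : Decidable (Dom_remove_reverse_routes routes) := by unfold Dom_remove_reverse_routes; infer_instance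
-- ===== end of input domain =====

-- B replaces A's set of reversed keys by a sieve: keep the first pending route, then filter
-- routes matching its reversed key out of the pending list and recurse (objective: alternative).

-- ===== PORT A =====
-- system["name"]: first-match lookup; total form getD "" is exact under Pre_ (KeyError excluded there)
def get_system_names (route : List (List (String × String))) : List String :=
  route.map (fun system => ((PySem.Dict.mk system).get? "name").getD "")

def remove_reverse_routes (routes : List (List (List (String × String)))) : List (List (List (String × String))) :=
  (routes.foldl
    (fun (acc : List (List (List (String × String))) × PySem.Set String) route =>
      let system_names := get_system_names route
      if PySem.Str.join "\t" system_names ∈ acc.2 then acc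
      else (acc.1 ++ [route],
            -- system_names[::-1] is .reverse
            PySem.Set.add acc.2 (PySem.Str.join "\t" system_names.reverse)))
    ([], PySem.Set.empty)).1

-- ===== PORT B =====
def get_system_names_alt (route : List (List (String × String))) : List String :=
  route.map (fun system => ((PySem.Dict.mk system).get? "name").getD "")

-- Source B's while loop over (result, pending): recursion on the pending list
def rrrSieve (pending : List (List (List (String × String)))) : List (List (List (String × String))) :=
  match pending with
  | [] => []
  | head :: rest =>
    head :: rrrSieve (rest.filter (fun r =>
      !(PySem.Str.join "\t" (get_system_names_alt r)
          == PySem.Str.join "\t" (get_system_names_alt head).reverse)))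
termination_by pending.length
decreasing_by
  simp only [List.length_cons, List.length_unattach]
  exact Nat.lt_succ_of_le (le_trans (List.length_filter_le _ _) (by simp))

def remove_reverse_routes_alt (routes : List (List (List (String × String)))) : List (List (List (String × String))) :=
  rrrSieve routes

-- ===== PRECONDITION & SPEC =====
-- Pre_ excludes exactly the inputs where A raises KeyError: some system dict lacks a "name" key.
def Pre_remove_reverse_routes (routes : List (List (List (String × String)))) : Prop :=
  ∀ route ∈ routes, ∀ system ∈ route, system.any (fun p => p.1 == "name") = true
instance (routes : List (List (List (String × String)))) : Decidable (Pre_remove_reverse_routes routes) := by unfold Pre_remove_reverse_routes; infer_instance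
def pvWitness_remove_reverse_routes : (List (List (List (String × String)))) :=
  [[[("name", "Sol")], [("name", "Alpha")]], [[("name", "Alpha")], [("name", "Sol")]]]
def Spec_remove_reverse_routes (routes : List (List (List (String × String)))) (out : List (List (List (String × String)))) : Prop := out = remove_reverse_routes_alt routes
instance (routes : List (List (List (String × String)))) (out : List (List (List (String × String)))) : Decidable (Spec_remove_reverse_routes routes out) := by unfold Spec_remove_reverse_routes; infer_instance

-- ===== CLAIM (what is proved, stated in full; the proofs are below) =====
def Claim_equal_remove_reverse_routes : Prop := ∀ (routes : List (List (List (String × String)))), Dom_remove_reverse_routes routes → Pre_remove_reverse_routes routes → Spec_remove_reverse_routes routes (remove_reverse_routes routes)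

-- ===== LEMMAS AND PROOFS =====

-- abbreviations used in the proofs only
def fKey (r : List (List (String × String))) : String :=
  PySem.Str.join "\t" (get_system_names_alt r)
def rKey (r : List (List (String × String))) : String :=
  PySem.Str.join "\t" (get_system_names_alt r).reverse

theorem rrrSieve_cons (head : List (List (String × String)))
    (rest : List (List (List (String × String)))) :
    rrrSieve (head :: rest)
      = head :: rrrSieve (rest.filter (fun r => !(fKey r == rKey head))) := by
  rw [rrrSieve]; rfl

-- A's fold from an arbitrary state equals res ++ sieve of the pending routes whose
-- forward key is not already in A's set.
theorem fold_sieve (routes : List (List (List (String × String))))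
    (res : List (List (List (String × String)))) (s : PySem.Set String) :
    (routes.foldl
      (fun (acc : List (List (List (String × String))) × PySem.Set String) route =>
        let system_names := get_system_names route
        if PySem.Str.join "\t" system_names ∈ acc.2 then acc
        else (acc.1 ++ [route], PySem.Set.add acc.2 (PySem.Str.join "\t" system_names.reverse)))
      (res, s)).1
    = res ++ rrrSieve (routes.filter (fun r => !(decide (fKey r ∈ s)))) := by
  induction routes generalizing res s with
  | nil => simp [rrrSieve]
  | cons route rest ih =>
    simp only [List.foldl_cons, List.filter_cons]
    have hkey : PySem.Str.join "\t" (get_system_names route) = fKey route := rfl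
    by_cases h : fKey route ∈ s
    · rw [if_pos (hkey ▸ h)]
      simp only [h, decide_true, Bool.not_true]
      exact ih res s
    · rw [if_neg (hkey ▸ h)]
      simp only [h, decide_false, Bool.not_false, if_true]
      rw [ih (res ++ [route]) _, rrrSieve_cons, List.filter_filter]
      have hfilt : ∀ r, (!(fKey r == rKey route) && !(decide (fKey r ∈ s)))
          = !(decide (fKey r ∈ PySem.Set.add s (PySem.Str.join "\t" (get_system_names route).reverse))) := by
        intro r
        have hr : (PySem.Str.join "\t" (get_system_names route).reverse) = rKey route := rfl
        rw [hr]
        by_cases h1 : fKey r ∈ PySem.Set.add s (rKey route)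
        · rcases (PySem.Set.mem_add _ _ _).mp h1 with h2 | h2
          · simp [h2]
          · simp [h2]
        · have h2 : fKey r ∉ s := fun hm => h1 ((PySem.Set.mem_add _ _ _).mpr (Or.inl hm))
          have h3 : fKey r ≠ rKey route := fun hm => h1 ((PySem.Set.mem_add _ _ _).mpr (Or.inr hm))
          simp [h1, h2, h3]
      rw [List.filter_congr (fun r _ => hfilt r)]
      simp

-- ===== VERDICT (by name: the statement is the Claim_ definition above) =====
theorem remove_reverse_routes_spec : Claim_equal_remove_reverse_routes := by
  intro routes _ _
  unfold Spec_remove_reverse_routes remove_reverse_routes remove_reverse_routes_alt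
  rw [fold_sieve routes [] PySem.Set.empty]
  simp [PySem.Set.empty, List.filter_eq_self.mpr]
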